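-- pv_equiv track=rewrite | github.com/AntonEryomin/yandex_algo_training | Тренировки по алгоритмам 1.0/Домашнее задание 4/Task E.py | pyramid_height
-- ===== SOURCE A (Python) =====
-- from typing import List
--
-- def pyramid_height(blocks: List[List[int]]) -> int:
--     w_blocks = {}
--     for block in blocks:
--         if block[0] in w_blocks:
--             w_blocks[block[0]].append(block[1])
--         else:
--             w_blocks[block[0]] = [block[1]]
--
--     height = 0
--     for w in sorted(w_blocks.keys()):
--         height += max(w_blocks[w])
--     return height
-- ===== SOURCE B (Python) =====
-- from typing import List
--
-- def pyramid_height(blocks: List[List[int]]) -> int: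
--     total = 0
--     rest = list(blocks)
--     while rest:
--         w = rest[0][0]
--         best = rest[0][1]
--         remaining = []
--         for b in rest[1:]:
--             if b[0] == w:
--                 if b[1] > best:
--                     best = b[1]
--             else:
--                 remaining.append(b)
--         total += best
--         rest = remaining
--     return total
-- ===== Notes on version B (the rewrite author's own statement) =====
-- stated objective: alternative
-- what changed: B uses no dictionary and no sort at all: it repeatedly peels one width group off the remaining block list (taking the running max of that width's heights while partitioning the rest into 'remaining'), adding one group maximum per outer iteration of a worklist loop.
import Mathlib
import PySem

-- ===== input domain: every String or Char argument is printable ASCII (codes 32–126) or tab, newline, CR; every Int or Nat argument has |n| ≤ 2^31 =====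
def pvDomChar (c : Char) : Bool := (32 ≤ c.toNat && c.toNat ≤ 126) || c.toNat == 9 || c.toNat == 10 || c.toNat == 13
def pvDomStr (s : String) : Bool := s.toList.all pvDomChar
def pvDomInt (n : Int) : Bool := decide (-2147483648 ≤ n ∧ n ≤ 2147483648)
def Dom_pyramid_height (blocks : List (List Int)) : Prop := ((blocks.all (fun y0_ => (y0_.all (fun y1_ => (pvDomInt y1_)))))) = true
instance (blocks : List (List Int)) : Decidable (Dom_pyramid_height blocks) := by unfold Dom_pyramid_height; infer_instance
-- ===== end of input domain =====

-- B replaces A's dict-of-lists grouping plus sorted-keys reduction by a dictionary-free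
-- worklist loop that peels one width group per iteration (objective: alternative).

-- ===== PORT A =====
-- shared index helpers: block[0] / block[1]; Pre_ keeps both in range
def pvW (b : List Int) : Int := (PySem.List.pyGet? b 0).getD 0
def pvH (b : List Int) : Int := (PySem.List.pyGet? b 1).getD 0
-- max(l); in A it is only applied to nonempty lists
def pvMaxD (l : List Int) : Int := (PySem.List.max? l id).getD 0

-- the body of A's first loop
def pvStepA (d : PySem.Dict Int (List Int)) (block : List Int) : PySem.Dict Int (List Int) :=
  match PySem.Dict.get? d (pvW block) with
  | some l => PySem.Dict.insert d (pvW block) (l ++ [pvH block])   -- w_blocks[block[0]].append(block[1])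
  | none   => PySem.Dict.insert d (pvW block) [pvH block]          -- w_blocks[block[0]] = [block[1]]

def pyramid_height (blocks : List (List Int)) : Int :=
  let w_blocks := blocks.foldl pvStepA (PySem.Dict.mk [])
  (PySem.List.sorted w_blocks.keys id false).foldl
    (fun height w => height + pvMaxD ((PySem.Dict.get? w_blocks w).getD [])) 0

-- ===== PORT B =====
-- the body of B's inner 'for b in rest[1:]' loop: bump the running max or collect b
def pvStepC (w : Int) (acc : Int × List (List Int)) (b : List Int) : Int × List (List Int) :=
  if pvW b == w then
    (if pvH b > acc.1 then pvH b else acc.1, acc.2)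
  else
    (acc.1, acc.2 ++ [b])

-- termination of B's while loop: 'remaining' never exceeds the scanned tail (cited below)
theorem pvStepC_snd_length (w : Int) (rs : List (List Int)) : ∀ (acc : Int × List (List Int)),
    ((rs.foldl (pvStepC w) acc).2).length ≤ acc.2.length + rs.length := by
  induction rs with
  | nil => intro acc; simp
  | cons b t ih =>
    intro acc
    refine le_trans (ih (pvStepC w acc b)) ?_
    simp only [pvStepC]
    split
    · simp
    · simp; omega

-- B's while loop: peel the width group of rest[0], recurse on the rest
def pvAltLoop (total : Int) (rest : List (List Int)) : Int :=
  match rest with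
  | [] => total
  | r0 :: rs =>
    let p := rs.foldl (pvStepC (pvW r0)) (pvH r0, [])
    pvAltLoop (total + p.1) p.2
termination_by rest.length
decreasing_by
  have h := pvStepC_snd_length (pvW r0) rs (pvH r0, ([] : List (List Int)))
  simp only [List.length_nil, Nat.zero_add] at h
  simp only [List.foldl_attach, List.length_cons]
  omega

def pyramid_height_alt (blocks : List (List Int)) : Int := pvAltLoop 0 blocks

-- ===== PRECONDITION & SPEC =====
-- Pre_ excludes exactly the inputs on which the Python A raises IndexError: a block with
-- fewer than two elements (block[1], or block[0] on an empty block). B raises there too.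
def Pre_pyramid_height (blocks : List (List Int)) : Prop := ∀ b ∈ blocks, 2 ≤ b.length
instance (blocks : List (List Int)) : Decidable (Pre_pyramid_height blocks) := by
  unfold Pre_pyramid_height; infer_instance

def pvWitness_pyramid_height : List (List Int) := [[1, 2], [1, 3], [2, 5]]

def Spec_pyramid_height (blocks : List (List Int)) (out : Int) : Prop := out = pyramid_height_alt blocks
instance (blocks : List (List Int)) (out : Int) : Decidable (Spec_pyramid_height blocks out) := by unfold Spec_pyramid_height; infer_instance

-- ===== CLAIM (what is proved, stated in full; the proofs are below) =====
def Claim_equal_pyramid_height : Prop := ∀ (blocks : List (List Int)), Dom_pyramid_height blocks → Pre_pyramid_height blocks → Spec_pyramid_height blocks (pyramid_height blocks)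

-- ===== LEMMAS AND PROOFS =====

-- the heights of the blocks of width w, in order
def pvHs (w : Int) (bs : List (List Int)) : List Int := (bs.filter (fun b => pvW b == w)).map pvH
-- the per-width maximum
def pvMx (w : Int) (bs : List (List Int)) : Int := pvMaxD (pvHs w bs)
-- the canonical value both programs compute: sum of per-width maxima over the distinct widths
def pvS (bs : List (List Int)) : Int := (((bs.map pvW).dedup).map (fun w => pvMx w bs)).sum

-- one step of the fold inside PySem.List.max? (with key = id), named so lemmas can rewrite it
def pvOMax (acc : Option Int) (x : Int) : Option Int :=
  match acc with
  | none => some x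
  | some m => if m < x then some x else some m

theorem pvMax?_eq_foldl (l : List Int) : PySem.List.max? l id = l.foldl pvOMax none := by
  simp only [PySem.List.max?]
  apply List.foldl_ext
  intro a x _
  cases a <;> rfl

theorem pvOMax_foldl_some (t : List Int) (m : Int) :
    t.foldl pvOMax (some m) = some (t.foldl (fun a x => if x > a then x else a) m) := by
  induction t generalizing m with
  | nil => rfl
  | cons b t ih =>
    simp only [List.foldl_cons, pvOMax]
    split
    · exact ih b
    · exact ih m

theorem pvMaxD_cons (m : Int) (l : List Int) :
    pvMaxD (m :: l) = l.foldl (fun a x => if x > a then x else a) m := by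
  simp only [pvMaxD, pvMax?_eq_foldl, List.foldl_cons, pvOMax, pvOMax_foldl_some, Option.getD_some]

-- A's dict after the first loop, characterized by lookup
theorem pvA_get? (blocks : List (List Int)) : ∀ (d : PySem.Dict Int (List Int)) (w : Int),
    PySem.Dict.get? (blocks.foldl pvStepA d) w =
      match PySem.Dict.get? d w with
      | some l => some (l ++ pvHs w blocks)
      | none => if w ∈ blocks.map pvW then some (pvHs w blocks) else none := by
  induction blocks with
  | nil =>
    intro d w
    cases hg : PySem.Dict.get? d w <;> simp [pvHs, hg]
  | cons b t ih =>
    intro d w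
    simp only [List.foldl_cons]
    rw [ih]
    by_cases hw : w = pvW b
    · subst hw
      have hf : pvHs (pvW b) (b :: t) = pvH b :: pvHs (pvW b) t := by simp [pvHs]
      cases hg : PySem.Dict.get? d (pvW b) with
      | some l =>
        have hs : PySem.Dict.get? (pvStepA d b) (pvW b) = some (l ++ [pvH b]) := by
          unfold pvStepA; rw [hg]; exact PySem.Dict.get?_insert_self _ _ _
        simp [hs, hf]
      | none =>
        have hs : PySem.Dict.get? (pvStepA d b) (pvW b) = some ([pvH b]) := by
          unfold pvStepA; rw [hg]; exact PySem.Dict.get?_insert_self _ _ _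
        simp [hs, hf]
    · have hf : pvHs w (b :: t) = pvHs w t := by
        simp only [pvHs, List.filter_cons]
        rw [if_neg (by simp only [beq_iff_eq]; exact fun h => hw h.symm)]
      have hstep : PySem.Dict.get? (pvStepA d b) w = PySem.Dict.get? d w := by
        unfold pvStepA
        cases PySem.Dict.get? d (pvW b) <;> exact PySem.Dict.get?_insert_of_ne _ _ hw
      rw [hstep, hf]
      cases hg : PySem.Dict.get? d w with
      | some l => rfl
      | none => simp [hw]

theorem pvA_keys_nodup (blocks : List (List Int)) : ∀ (d : PySem.Dict Int (List Int)),
    d.keys.Nodup → (blocks.foldl pvStepA d).keys.Nodup := by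
  induction blocks with
  | nil => intro d h; exact h
  | cons b t ih =>
    intro d h
    apply ih
    unfold pvStepA
    cases PySem.Dict.get? d (pvW b) <;> exact PySem.Dict.nodup_keys_insert _ _ _ h

theorem pvA_mem_keys (blocks : List (List Int)) : ∀ (d : PySem.Dict Int (List Int)) (w : Int),
    w ∈ (blocks.foldl pvStepA d).keys ↔ w ∈ d.keys ∨ w ∈ blocks.map pvW := by
  induction blocks with
  | nil => intro d w; simp
  | cons b t ih =>
    intro d w
    simp only [List.foldl_cons, ih]
    have hstep : w ∈ (pvStepA d b).keys ↔ w = pvW b ∨ w ∈ d.keys := by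
      unfold pvStepA
      cases PySem.Dict.get? d (pvW b) <;> exact PySem.Dict.mem_keys_insert _ _ _ _
    rw [hstep]
    simp only [List.map_cons, List.mem_cons]
    tauto

-- ===== B-side characterizations =====
theorem pvFoldC (w : Int) (rs : List (List Int)) : ∀ (m : Int) (rem : List (List Int)),
    rs.foldl (pvStepC w) (m, rem)
      = ((pvHs w rs).foldl (fun a x => if x > a then x else a) m,
         rem ++ rs.filter (fun b => !(pvW b == w))) := by
  induction rs with
  | nil => intro m rem; simp [pvHs]
  | cons b t ih =>
    intro m rem
    by_cases hb : pvW b = w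
    · have h1 : pvHs w (b :: t) = pvH b :: pvHs w t := by simp [pvHs, hb]
      have h2 : List.filter (fun b => !(pvW b == w)) (b :: t)
          = List.filter (fun b => !(pvW b == w)) t := by
        simp [hb]
      simp only [List.foldl_cons, pvStepC, h1, h2]
      rw [if_pos (by simp [hb]), ih]
    · have h1 : pvHs w (b :: t) = pvHs w t := by simp [pvHs, hb]
      have h2 : List.filter (fun b => !(pvW b == w)) (b :: t)
          = b :: List.filter (fun b => !(pvW b == w)) t := by
        simp [hb]
      simp only [List.foldl_cons, pvStepC, h1, h2]
      rw [if_neg (by simp [hb]), ih]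
      simp

theorem pvHs_filter_ne (w w0 : Int) (h : w ≠ w0) (bs : List (List Int)) :
    pvHs w (bs.filter (fun b => !(pvW b == w0))) = pvHs w bs := by
  unfold pvHs
  rw [List.filter_filter]
  congr 1
  apply List.filter_congr
  intro b _
  by_cases hb : pvW b = w
  · simp [hb, h]
  · simp [hb]

theorem pvMem_widths_filter (x w0 : Int) (bs : List (List Int)) :
    x ∈ (bs.filter (fun b => !(pvW b == w0))).map pvW ↔ x ∈ bs.map pvW ∧ x ≠ w0 := by
  simp only [List.mem_map, List.mem_filter]
  constructor
  · rintro ⟨b, ⟨hb, hne⟩, rfl⟩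
    exact ⟨⟨b, hb, rfl⟩, by simpa using hne⟩
  · rintro ⟨⟨b, hb, rfl⟩, hne⟩
    exact ⟨b, ⟨hb, by simpa using hne⟩, rfl⟩

-- the peel step: pvS splits off the width group of the head
theorem pvS_cons (r0 : List Int) (rs : List (List Int)) :
    pvS (r0 :: rs) = pvMx (pvW r0) (r0 :: rs) + pvS (rs.filter (fun b => !(pvW b == pvW r0))) := by
  set w0 := pvW r0 with hw0
  set rest' := rs.filter (fun b => !(pvW b == w0)) with hrest'
  set D := ((r0 :: rs).map pvW).dedup with hD
  have hmem0 : w0 ∈ D := by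
    simp only [hD, List.mem_dedup, List.map_cons, List.mem_cons]
    exact Or.inl hw0
  have hndD : D.Nodup := List.nodup_dedup _
  have hperm : D.Perm (w0 :: D.erase w0) := List.perm_cons_erase hmem0
  have hstep1 : pvS (r0 :: rs) = pvMx w0 (r0 :: rs) + (((D.erase w0).map (fun w => pvMx w (r0 :: rs)))).sum := by
    unfold pvS
    rw [(hperm.map (fun w => pvMx w (r0 :: rs))).sum_eq]
    simp
  rw [hstep1]
  congr 1
  -- Σ over D.erase w0 of pvMx · (r0::rs) = pvS rest'
  have hcong : (D.erase w0).map (fun w => pvMx w (r0 :: rs)) = (D.erase w0).map (fun w => pvMx w rest') := by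
    apply List.map_congr_left
    intro x hx
    have hxne : x ≠ w0 := (List.Nodup.mem_erase_iff hndD).mp hx |>.1
    have h1 : pvHs x (r0 :: rs) = pvHs x rs := by
      simp only [pvHs, List.filter_cons]
      rw [if_neg (by simp [← hw0]; exact fun h => hxne h.symm)]
    have h2 : pvHs x rest' = pvHs x rs := pvHs_filter_ne x w0 hxne rs
    simp only [pvMx, h1, h2]
  rw [hcong]
  -- D.erase w0 is a permutation of (rest'.map pvW).dedup
  have hnd2 : ((rest'.map pvW).dedup).Nodup := List.nodup_dedup _
  have hmemiff : ∀ x, x ∈ D.erase w0 ↔ x ∈ (rest'.map pvW).dedup := by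
    intro x
    rw [List.Nodup.mem_erase_iff hndD, List.mem_dedup, List.mem_dedup]
    rw [hrest', pvMem_widths_filter]
    simp only [hD, List.mem_dedup] at *
    constructor
    · rintro ⟨hne, hmem⟩
      rcases (by simpa using hmem : x = w0 ∨ x ∈ rs.map pvW) with h | h
      · exact absurd h hne
      · exact ⟨h, hne⟩
    · rintro ⟨hmem, hne⟩
      exact ⟨hne, by simp [hmem]⟩
  have hperm2 : (D.erase w0).Perm ((rest'.map pvW).dedup) :=
    (List.perm_ext_iff_of_nodup (hndD.erase w0) hnd2).mpr hmemiff
  unfold pvS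
  exact (hperm2.map (fun w => pvMx w rest')).sum_eq

-- B's loop computes total + pvS of the worklist
theorem pvAltLoop_eq : ∀ (n : Nat) (rest : List (List Int)), rest.length ≤ n →
    ∀ total, pvAltLoop total rest = total + pvS rest := by
  intro n
  induction n with
  | zero =>
    intro rest hlen total
    have : rest = [] := List.eq_nil_of_length_eq_zero (Nat.le_zero.mp hlen)
    subst this
    simp [pvAltLoop, pvS]
  | succ n ih =>
    intro rest hlen total
    match rest with
    | [] => simp [pvAltLoop, pvS]
    | r0 :: rs =>
      rw [pvAltLoop]
      rw [pvFoldC]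
      simp only [List.nil_append]
      have hlen' : (rs.filter (fun b => !(pvW b == pvW r0))).length ≤ n :=
        le_trans (List.length_filter_le _ _) (by simpa using Nat.le_of_succ_le_succ hlen)
      rw [ih _ hlen']
      rw [pvS_cons]
      have hmx : pvMx (pvW r0) (r0 :: rs)
          = (pvHs (pvW r0) rs).foldl (fun a x => if x > a then x else a) (pvH r0) := by
        have : pvHs (pvW r0) (r0 :: rs) = pvH r0 :: pvHs (pvW r0) rs := by simp [pvHs]
        rw [pvMx, this, pvMaxD_cons]
      rw [hmx]
      ring

-- A computes pvS as well
theorem pvA_eq (blocks : List (List Int)) : pyramid_height blocks = pvS blocks := by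
  unfold pyramid_height
  set dA := blocks.foldl pvStepA (PySem.Dict.mk []) with hdA
  rw [PySem.List.foldl_add]
  simp only [Int.zero_add]
  have hperm : ((PySem.List.sorted dA.keys id false).map
      (fun w => pvMaxD ((PySem.Dict.get? dA w).getD []))).Perm
      (dA.keys.map (fun w => pvMaxD ((PySem.Dict.get? dA w).getD []))) :=
    (PySem.List.sorted_perm dA.keys id false).map _
  rw [hperm.sum_eq]
  have hnd : dA.keys.Nodup := pvA_keys_nodup blocks _ (by simp [PySem.Dict.keys])
  have hget : ∀ w ∈ dA.keys, PySem.Dict.get? dA w = some (pvHs w blocks) := by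
    intro w hw
    have hmem : w ∈ blocks.map pvW := by
      rcases (pvA_mem_keys blocks _ w).mp (hdA ▸ hw) with h | h
      · simp [PySem.Dict.keys] at h
      · exact h
    rw [hdA, pvA_get? blocks _ w]
    simp only [PySem.Dict.get?]
    simp [hmem]
  have hcong : dA.keys.map (fun w => pvMaxD ((PySem.Dict.get? dA w).getD []))
      = dA.keys.map (fun w => pvMx w blocks) := by
    apply List.map_congr_left
    intro w hw
    rw [hget w hw]
    rfl
  rw [hcong]
  have hmemiff : ∀ x, x ∈ dA.keys ↔ x ∈ (blocks.map pvW).dedup := by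
    intro x
    rw [List.mem_dedup, hdA, pvA_mem_keys]
    simp [PySem.Dict.keys]
  have hperm2 : dA.keys.Perm ((blocks.map pvW).dedup) :=
    (List.perm_ext_iff_of_nodup hnd (List.nodup_dedup _)).mpr hmemiff
  unfold pvS
  exact (hperm2.map (fun w => pvMx w blocks)).sum_eq

-- ===== VERDICT (by name: the statement is the Claim_ definition above) =====
theorem pyramid_height_spec : Claim_equal_pyramid_height := by
  intro blocks _ _
  unfold Spec_pyramid_height pyramid_height_alt
  rw [pvA_eq, pvAltLoop_eq blocks.length blocks (le_refl _) 0]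
  simp
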